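-- pv_equiv track=rewrite | github.com/xavierloreto/ex-python-2025 | plates.py | numbers_only_at_end
-- ===== SOURCE A (Python) =====
-- def numbers_only_at_end(plate):
--     has_number = False
--     for char in plate:
--         if char.isdigit():
--             if not has_number:
--                 if char == '0':
--                     return False
--                 has_number = True
--         elif has_number:
--             return False
--
--     return True
-- ===== SOURCE B (Python) =====
-- def numbers_only_at_end(plate):
--     # Locate the first digit, then validate the two spans separately:
--     # everything from the first digit on must be digits and must not start with '0'.
--     for i, ch in enumerate(plate):
--         if ch.isdigit():
--             rest = plate[i:]
--             return rest[0] != '0' and all(c.isdigit() for c in rest)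
--     return True
-- ===== Notes on version B (the rewrite author's own statement) =====
-- stated objective: alternative
-- what changed: B locates the boundary at the first digit and validates the two spans (digit-free prefix, all-digit suffix not starting with '0') instead of threading a has_number flag through one stateful scan.
import Mathlib
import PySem

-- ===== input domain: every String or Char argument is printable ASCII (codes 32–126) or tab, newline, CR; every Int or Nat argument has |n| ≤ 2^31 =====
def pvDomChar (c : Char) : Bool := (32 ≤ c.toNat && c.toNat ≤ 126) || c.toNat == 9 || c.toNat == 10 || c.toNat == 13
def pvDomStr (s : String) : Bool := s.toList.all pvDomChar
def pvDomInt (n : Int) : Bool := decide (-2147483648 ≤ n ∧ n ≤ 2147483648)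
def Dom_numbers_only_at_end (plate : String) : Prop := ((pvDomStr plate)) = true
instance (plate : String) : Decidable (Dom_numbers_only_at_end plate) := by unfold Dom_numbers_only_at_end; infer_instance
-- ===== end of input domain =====

-- B re-decomposes A's stateful single scan as: split at the first digit, then validate prefix and suffix spans separately (alternative decomposition, same cost).
-- ===== PORT A =====
-- A: one pass with a has_number flag, early returns modelled by the loop returning the final Bool.
def numbersLoopA : List Char → Bool → Bool
  | [], _ => true
  | c :: cs, hn =>
    if PySem.Chars.isdigit c then
      if !hn then
        if c == '0' then false
        else numbersLoopA cs true
      else numbersLoopA cs hn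
    else
      if hn then false
      else numbersLoopA cs hn

def numbers_only_at_end (plate : String) : Bool :=
  numbersLoopA plate.toList false

-- ===== PORT B =====
-- B: drop the digit-free prefix (the enumerate scan to the first digit);
-- the rest must be non-empty-safe: first char ≠ '0' and all chars digits.
def numbers_only_at_end_alt (plate : String) : Bool :=
  match plate.toList.dropWhile (fun c => !(PySem.Chars.isdigit c)) with
  | [] => true
  | c :: rest => (c != '0') && rest.all PySem.Chars.isdigit

-- ===== PRECONDITION & SPEC =====
def Spec_numbers_only_at_end (plate : String) (out : Bool) : Prop := out = numbers_only_at_end_alt plate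
instance (plate : String) (out : Bool) : Decidable (Spec_numbers_only_at_end plate out) := by unfold Spec_numbers_only_at_end; infer_instance

-- ===== CLAIM (what is proved, stated in full; the proofs are below) =====
def Claim_equal_numbers_only_at_end : Prop := ∀ (plate : String), Dom_numbers_only_at_end plate → Spec_numbers_only_at_end plate (numbers_only_at_end plate)

-- ===== LEMMAS AND PROOFS =====

-- ===== VERDICT (by name: the statement is the Claim_ definition above) =====
theorem numbersLoopA_true (l : List Char) :
    numbersLoopA l true = l.all PySem.Chars.isdigit := by
  induction l with
  | nil => rfl
  | cons c cs ih => simp [numbersLoopA, List.all_cons, ih]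

theorem numbersLoopA_false (l : List Char) :
    numbersLoopA l false =
      match l.dropWhile (fun c => !(PySem.Chars.isdigit c)) with
      | [] => true
      | c :: rest => (c != '0') && rest.all PySem.Chars.isdigit := by
  induction l with
  | nil => rfl
  | cons c cs ih =>
    by_cases hd : PySem.Chars.isdigit c
    · simp [numbersLoopA, hd, numbersLoopA_true]
      by_cases h0 : c = '0' <;> simp [h0]
    · simpa [numbersLoopA, hd, List.dropWhile_cons] using ih

theorem numbers_only_at_end_spec : Claim_equal_numbers_only_at_end := by
  intro plate _
  unfold Spec_numbers_only_at_end numbers_only_at_end numbers_only_at_end_alt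
  exact numbersLoopA_false plate.toList
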